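-- pv_equiv track=rewrite | github.com/deeppavlov/DeepPavlov | deeppavlov/core/data/utils.py | _get_all_dimensions
-- ===== SOURCE A (Python) =====
-- from typing import Any, Generator, Iterable, List, Mapping, Optional, Sequence, Sized, Union, Collection
--
-- def _get_all_dimensions(batch: Sequence, level: int = 0, res: Optional[List[List[int]]] = None) -> List[List[int]]:
--     """Return all presented element sizes of each dimension.
--
--     Args:
--         batch: Data array.
--         level: Recursion level.
--         res: List containing element sizes of each dimension.
--
--     Return:
--         List, i-th element of which is list containing all presented sized of batch's i-th dimension.
--
--     Examples:
--         >>> x = [[[1], [2, 3]], [[4], [5, 6, 7], [8, 9]]]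
--         >>> _get_all_dimensions(x)
--         [[2], [2, 3], [1, 2, 1, 3, 2]]
--
--     """
--     if not level:
--         res = [[len(batch)]]
--     if len(batch) and isinstance(batch[0], Sized) and not isinstance(batch[0], str):
--         level += 1
--         if len(res) <= level:
--             res.append([])
--         for item in batch:
--             res[level].append(len(item))
--             _get_all_dimensions(item, level, res)
--     return res
-- ===== SOURCE B (Python) =====
-- from typing import Any, Generator, Iterable, List, Mapping, Optional, Sequence, Sized, Union, Collection
--
--
-- def _get_all_dimensions(batch: Sequence, level: int = 0, res: Optional[List[List[int]]] = None) -> List[List[int]]: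
--     """Iterative breadth-first version: one frontier per depth instead of a DFS recursion."""
--     if not level:
--         res = [[len(batch)]]
--     frontier = [batch]
--     cur = level
--     while True:
--         children = [child for node in frontier
--                     if len(node) and isinstance(node[0], Sized) and not isinstance(node[0], str)
--                     for child in node]
--         if not children:
--             break
--         cur += 1
--         if len(res) <= cur:
--             res.append([])
--         res[cur].extend(len(c) for c in children)
--         frontier = children
--     return res
-- ===== Notes on version B (the rewrite author's own statement) =====
-- stated objective: alternative
-- what changed: Replaces A's recursive depth-first descent (one recursive call per element, appending into res along the way) with an iterative breadth-first loop that keeps a frontier of nodes and fills one whole dimension level of res per round.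
-- outside the precondition, e.g. on _get_all_dimensions([[[1]]], -1, []): A returns [[1]], B returns [[1], [1]]
import Mathlib
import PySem

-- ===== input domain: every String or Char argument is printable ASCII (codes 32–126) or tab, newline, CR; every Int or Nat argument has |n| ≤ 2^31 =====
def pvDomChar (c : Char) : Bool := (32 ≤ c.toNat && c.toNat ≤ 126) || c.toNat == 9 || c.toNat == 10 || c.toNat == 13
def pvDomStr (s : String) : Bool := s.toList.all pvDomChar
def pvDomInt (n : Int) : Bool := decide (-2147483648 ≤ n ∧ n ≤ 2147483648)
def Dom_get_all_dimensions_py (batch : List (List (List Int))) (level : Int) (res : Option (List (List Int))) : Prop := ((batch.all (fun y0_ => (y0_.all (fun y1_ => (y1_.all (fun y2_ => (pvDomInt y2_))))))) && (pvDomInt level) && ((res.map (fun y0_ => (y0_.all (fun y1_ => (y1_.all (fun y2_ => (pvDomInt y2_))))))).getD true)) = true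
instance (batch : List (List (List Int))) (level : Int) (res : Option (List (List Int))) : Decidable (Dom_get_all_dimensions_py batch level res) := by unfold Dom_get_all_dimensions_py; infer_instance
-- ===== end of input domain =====

-- B replaces A's recursive depth-first descent by an iterative breadth-first pass (one frontier per
-- nesting level); equivalence is about the return value only (Python A mutates a caller-supplied res in place).


-- ===== PORT A =====
-- res[i].append(v): fetch res[i], write back res[i] ++ [v], both with Python index semantics
-- (negative i counts from the end). Where Python raises IndexError (pyGet?/pySet? = none) — outside
-- Pre_ — the state is returned unchanged.
def pyAppendAt (res : List (List Int)) (i : Int) (v : Int) : List (List Int) :=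
  match PySem.List.pyGet? res i with
  | some xs => (PySem.List.pySet? res i (xs ++ [v])).getD res
  | none => res

-- recursion at the innermost depth: batch's elements are ints, so
-- 'isinstance(batch[0], Sized)' is False and the guarded block never runs
def goA2 (_batch : List Int) (_level : Int) (res : List (List Int)) : List (List Int) :=
  res

-- recursion one level down: elements are lists (Sized, not str), so the guard is 'len(batch)'.
-- The recursive call's return value is discarded in Python: the state threaded here is the CALLER's
-- shared res, so when the callee's 'if not level' fires (level = 0) it rebinds a fresh local list
-- and the shared res is left untouched.
def goA1 (batch : List (List Int)) (level : Int) (res : List (List Int)) : List (List Int) :=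
  if level = 0 then res
  else if batch = [] then res
  else
    let level := level + 1
    let res := if (res.length : Int) ≤ level then res ++ [([] : List Int)] else res
    batch.foldl (fun res item => goA2 item level (pyAppendAt res level (item.length : Int))) res

def get_all_dimensions_py (batch : List (List (List Int))) (level : Int) (res : Option (List (List Int))) : List (List Int) :=
  -- 'if not level: res = [[len(batch)]]'; res = None with level ≠ 0 only occurs outside Pre_
  -- (Python raises TypeError, or returns None which is not a value of the declared type)
  let res : List (List Int) := if level = 0 then [[(batch.length : Int)]] else res.getD []
  if batch = [] then res
  else
    let level := level + 1
    let res := if (res.length : Int) ≤ level then res ++ [([] : List Int)] else res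
    batch.foldl (fun res item => goA1 item level (pyAppendAt res level (item.length : Int))) res

-- ===== PORT B =====
-- 'if len(res) <= cur: res.append([])' followed by 'res[cur].extend(lens)' (Python index semantics;
-- on IndexError — outside Pre_ — the state is returned unchanged)
def extendAt (res : List (List Int)) (i : Int) (lens : List Int) : List (List Int) :=
  let res := if (res.length : Int) ≤ i then res ++ [([] : List Int)] else res
  match PySem.List.pyGet? res i with
  | some xs => (PySem.List.pySet? res i (xs ++ lens)).getD res
  | none => res

-- Source B's while-loop over frontiers, unrolled: the element type fixes the nesting depth at 3, so
-- round 1 has frontier [batch], round 2 the depth-1 nodes, and round 3's nodes have int heads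
-- (not Sized), producing no children — the loop exits after at most two productive rounds.
def get_all_dimensions_py_alt (batch : List (List (List Int))) (level : Int) (res : Option (List (List Int))) : List (List Int) :=
  let res0 : List (List Int) := if level = 0 then [[(batch.length : Int)]] else res.getD []
  let c1 : List (List (List Int)) := if batch = [] then [] else batch
  if c1 = [] then res0
  else
    let cur1 := level + 1
    let res1 := extendAt res0 cur1 (c1.map (fun c => (c.length : Int)))
    let c2 : List (List Int) := c1.flatMap (fun node => if node = [] then [] else node)
    if c2 = [] then res1
    else
      let cur2 := cur1 + 1
      let res2 := extendAt res1 cur2 (c2.map (fun c => (c.length : Int)))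
      res2

-- ===== PRECONDITION & SPEC =====
-- Pre_ excludes: calls with level ≠ 0 and res = None (A raises TypeError, or returns None, not a
-- list); level ≥ 1 with nonempty batch and res shorter than level+1 (A raises IndexError); and
-- negative level (there A's value is an artefact of the internal recursion protocol: negative
-- indexing into res and a mid-recursion rebinding of res when the incremented level reaches 0).
def Pre_get_all_dimensions_py (batch : List (List (List Int))) (level : Int) (res : Option (List (List Int))) : Prop :=
  level = 0 ∨ (res ≠ none ∧ (batch = [] ∨ (1 ≤ level ∧ level + 1 ≤ ((res.getD []).length : Int))))
instance (batch : List (List (List Int))) (level : Int) (res : Option (List (List Int))) : Decidable (Pre_get_all_dimensions_py batch level res) := by unfold Pre_get_all_dimensions_py; infer_instance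

def pvWitness_get_all_dimensions_py : List (List (List Int)) × Int × Option (List (List Int)) :=
  ([[[1], [2, 3]], [[4], [5, 6, 7], [8, 9]]], 0, none)

def Spec_get_all_dimensions_py (batch : List (List (List Int))) (level : Int) (res : Option (List (List Int))) (out : List (List Int)) : Prop := out = get_all_dimensions_py_alt batch level res
instance (batch : List (List (List Int))) (level : Int) (res : Option (List (List Int))) (out : List (List Int)) : Decidable (Spec_get_all_dimensions_py batch level res out) := by unfold Spec_get_all_dimensions_py; infer_instance

-- ===== CLAIM (what is proved, stated in full; the proofs are below) =====
def Claim_equal_get_all_dimensions_py : Prop := ∀ (batch : List (List (List Int))) (level : Int) (res : Option (List (List Int))), Dom_get_all_dimensions_py batch level res → Pre_get_all_dimensions_py batch level res → Spec_get_all_dimensions_py batch level res (get_all_dimensions_py batch level res)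

-- ===== LEMMAS AND PROOFS =====

-- skipping an empty node contributes nothing, so B's guarded flatMap equals the plain one
theorem flatMap_ite (xs : List (List (List Int))) :
    xs.flatMap (fun node => if node = [] then [] else node) = xs.flatMap id := by
  induction xs with
  | nil => rfl
  | cons a l ih =>
      simp only [List.flatMap_cons, ih, id]
      split <;> simp_all

-- appending at a slot exhibited by an append/cons decomposition
theorem pyAppendAt_shape (pre tail : List (List Int)) (x : List Int) (v : Int) :
    pyAppendAt (pre ++ x :: tail) (pre.length : Int) v = pre ++ (x ++ [v]) :: tail := by
  simp only [pyAppendAt, PySem.List.pyGet?_append_length,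
    PySem.List.pySet?_natCast (pre ++ x :: tail) pre.length (x ++ [v]) (by simp)]
  simp

-- extendAt at an existing slot: the conditional append cannot fire
theorem extendAt_shape (pre tail : List (List Int)) (y : List Int) (lens : List Int) :
    extendAt (pre ++ y :: tail) (pre.length : Int) lens = pre ++ (y ++ lens) :: tail := by
  have h1 : ¬ (((pre ++ y :: tail).length : Int) ≤ (pre.length : Int)) := by simp
  simp only [extendAt, if_neg h1, PySem.List.pyGet?_append_length,
    PySem.List.pySet?_natCast (pre ++ y :: tail) pre.length (y ++ lens) (by simp)]
  simp

-- extendAt one past the end: the slot is created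
theorem extendAt_create (pre : List (List Int)) (lens : List Int) :
    extendAt pre (pre.length : Int) lens = pre ++ [lens] := by
  simp only [extendAt, if_pos (le_refl (pre.length : Int)), PySem.List.pyGet?_append_length,
    PySem.List.pySet?_natCast (pre ++ [[]]) pre.length ([] ++ lens) (by simp)]
  simp

-- the inner per-item loop of goA1: successive appends at one fixed slot
theorem foldA_inner (xs : List (List Int)) (pre tail : List (List Int)) (y : List Int) :
    xs.foldl (fun r s => pyAppendAt r (pre.length : Int) (s.length : Int)) (pre ++ y :: tail)
      = pre ++ (y ++ xs.map (fun s => (s.length : Int))) :: tail := by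
  induction xs generalizing y with
  | nil => simp
  | cons s rest ih =>
      rw [List.foldl_cons, pyAppendAt_shape, ih]
      simp

-- goA1 on a state that already has slot pre.length+1
theorem goA1_shape (item : List (List Int)) (pre tail : List (List Int)) (x y : List Int)
    (h0 : pre ≠ []) :
    goA1 item (pre.length : Int) (pre ++ x :: y :: tail)
      = pre ++ x :: (y ++ item.map (fun s => (s.length : Int))) :: tail := by
  have hl0 : ¬ ((pre.length : Int) = 0) := by simp [h0]
  by_cases h : item = []
  · simp [goA1, h]
  · have h2 : ¬ (((pre ++ x :: y :: tail).length : Int) ≤ (pre.length : Int) + 1) := by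
      simp
    simp only [goA1, if_neg hl0, if_neg h, if_neg h2, goA2]
    have hc : (pre.length : Int) + 1 = (((pre ++ [x]) : List (List Int)).length : Int) := by simp
    rw [hc]
    have := foldA_inner item (pre ++ [x]) tail y
    simpa using this

-- goA1 on a state ending exactly at slot pre.length: a nonempty item creates slot pre.length+1
theorem goA1_create (item : List (List Int)) (pre : List (List Int)) (x : List Int) (h : item ≠ [])
    (h0 : pre ≠ []) :
    goA1 item (pre.length : Int) (pre ++ [x])
      = pre ++ x :: (item.map (fun s => (s.length : Int))) :: [] := by
  have hl0 : ¬ ((pre.length : Int) = 0) := by simp [h0]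
  have h2 : (((pre ++ [x]).length : Int) ≤ (pre.length : Int) + 1) := by simp
  simp only [goA1, if_neg hl0, if_neg h, if_pos h2, goA2]
  have hc : (pre.length : Int) + 1 = (((pre ++ [x]) : List (List Int)).length : Int) := by simp
  rw [hc]
  have := foldA_inner item (pre ++ [x]) [] []
  simpa using this

-- goA1 ignores an empty item
theorem goA1_nil (level : Int) (res : List (List Int)) : goA1 [] level res = res := by
  simp [goA1]

-- the top-level loop of A when the state already has both slots pre.length and pre.length+1
theorem foldA_two (batch : List (List (List Int))) (pre tail : List (List Int)) (x y : List Int)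
    (h0 : pre ≠ []) :
    batch.foldl (fun r item => goA1 item (pre.length : Int) (pyAppendAt r (pre.length : Int) (item.length : Int)))
        (pre ++ x :: y :: tail)
      = pre ++ (x ++ batch.map (fun c => (c.length : Int))) :: (y ++ (batch.flatMap id).map (fun s => (s.length : Int))) :: tail := by
  induction batch generalizing x y with
  | nil => simp
  | cons item rest ih =>
      rw [List.foldl_cons, pyAppendAt_shape, goA1_shape _ _ _ _ _ h0, ih]
      simp

-- the top-level loop of A when the state ends exactly at slot pre.length
theorem foldA_one (batch : List (List (List Int))) (pre : List (List Int)) (x : List Int)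
    (h0 : pre ≠ []) :
    batch.foldl (fun r item => goA1 item (pre.length : Int) (pyAppendAt r (pre.length : Int) (item.length : Int)))
        (pre ++ [x])
      = if batch.flatMap id = [] then pre ++ [x ++ batch.map (fun c => (c.length : Int))]
        else pre ++ (x ++ batch.map (fun c => (c.length : Int))) :: [(batch.flatMap id).map (fun s => (s.length : Int))] := by
  induction batch generalizing x with
  | nil => simp
  | cons item rest ih =>
      rw [List.foldl_cons, pyAppendAt_shape]
      by_cases h : item = []
      · subst h
        rw [goA1_nil, ih]
        simp
      · rw [goA1_create item pre (x ++ [(item.length : Int)]) h h0, foldA_two _ _ _ _ _ h0]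
        have hflat : (item :: rest).flatMap id ≠ [] := by
          simp [List.flatMap_cons, h]
        rw [if_neg hflat]
        simp

-- ===== VERDICT (by name: the statement is the Claim_ definition above) =====
theorem get_all_dimensions_py_spec : Claim_equal_get_all_dimensions_py := by
  intro batch level res _hdom hpre
  unfold Spec_get_all_dimensions_py
  by_cases hb : batch = []
  · subst hb
    simp [get_all_dimensions_py, get_all_dimensions_py_alt]
  · simp only [get_all_dimensions_py, get_all_dimensions_py_alt, if_neg hb]
    set R : List (List Int) := (if level = 0 then [[(batch.length : Int)]] else res.getD []) with hR
    obtain ⟨k, hk, hk1, hkR⟩ : ∃ k : Nat, level + 1 = (k : Int) ∧ 1 ≤ k ∧ k ≤ R.length := by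
      rcases hpre with h0 | ⟨_, hrest⟩
      · exact ⟨1, by omega, le_refl 1, by simp [hR, h0]⟩
      · rcases hrest with hb' | ⟨hl1, hl2⟩
        · exact absurd hb' hb
        · refine ⟨(level + 1).toNat, by omega, by omega, ?_⟩
          have : ¬ level = 0 := by omega
          rw [hR, if_neg this]
          omega
    rw [hk, flatMap_ite]
    rw [show ((k : Int) + 1) = ((k + 1 : Nat) : Int) by push_cast; ring]
    by_cases heq : R.length = k
    · -- the slot k is one past the end: A appends [], B's extendAt creates it
      rw [show (k : Int) = (R.length : Int) by omega]
      rw [if_pos (le_refl (R.length : Int)), extendAt_create]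
      have hR0 : R ≠ [] := by
        intro hnil
        rw [hnil] at heq
        simp at heq
        omega
      rw [foldA_one batch R [] hR0]
      by_cases hflat : batch.flatMap id = []
      · simp [hflat]
      · rw [if_neg hflat, if_neg hflat]
        rw [show ((k + 1 : Nat) : Int) = (((R ++ [batch.map (fun c => (c.length : Int))]).length : Int)) by simp; omega]
        rw [extendAt_create]
        simp
    · -- slot k exists: decompose R around it
      have hklt : k < R.length := by omega
      obtain ⟨x, tl, hdec, hpre_len⟩ : ∃ x tl, R = R.take k ++ x :: tl ∧ (R.take k).length = k := by
        have h1 : (R.drop k).length = R.length - k := by simp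
        rcases hd : R.drop k with _ | ⟨x, tl⟩
        · rw [hd] at h1; simp at h1; omega
        · exact ⟨x, tl, by rw [← hd, List.take_append_drop], by simp; omega⟩
      set pre := R.take k with hpre
      rw [hdec]
      have hnoapp : ¬ (((pre ++ x :: tl).length : Int) ≤ (k : Int)) := by
        simp; omega
      rw [if_neg hnoapp]
      rw [show (k : Int) = (pre.length : Int) by omega]
      rw [extendAt_shape]
      have hpre0 : pre ≠ [] := by
        intro hnil
        rw [hnil] at hpre_len
        simp at hpre_len
        omega
      rcases tl with _ | ⟨y, tail⟩
      · -- R ends exactly at slot k: slot k+1 may be created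
        rw [foldA_one _ _ _ hpre0]
        by_cases hflat : batch.flatMap id = []
        · simp [hflat]
        · rw [if_neg hflat, if_neg hflat]
          rw [show ((k + 1 : Nat) : Int) = (((pre ++ [x ++ batch.map (fun c => (c.length : Int))]).length : Int)) by simp; omega]
          rw [extendAt_create]
          simp
      · -- both slots k and k+1 exist already
        rw [foldA_two _ _ _ _ _ hpre0]
        by_cases hflat : batch.flatMap id = []
        · simp [hflat]
        · rw [if_neg hflat]
          rw [show ((k + 1 : Nat) : Int) = (((pre ++ [x ++ batch.map (fun c => (c.length : Int))]).length : Int)) by simp; omega]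
          rw [show (pre ++ (x ++ batch.map (fun c => (c.length : Int))) :: y :: tail) = ((pre ++ [x ++ batch.map (fun c => (c.length : Int))]) ++ y :: tail) by simp]
          rw [extendAt_shape]
          simp
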